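-- pv_equiv track=rewrite | github.com/lca-imcb/lca-ngs | contam_filter.py | higher_read_name
-- ===== SOURCE A (Python) =====
-- def higher_read_name(r1, r2):
--     '''
--     Compare read names: split at ':' and compare each field as int, if possible.
--     Returns True is r1 name is higher,
--     '''
--     r1 = r1.split(':')
--     r2 = r2.split(':')
--     assert len(r1) == len(r2)
--     for i in range(len(r1)):
--         try:
--             if int(r1[i]) < int(r2[i]):
--                 return False
--             if int(r1[i]) > int(r2[i]):
--                 return True
--         except ValueError:
--             if r1[i] < r2[i]:
--                 return False
--             elif r1[i] > r2[i]:
--                 return True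
--     else: # equity
--         return False
-- ===== SOURCE B (Python) =====
-- def higher_read_name(r1, r2):
--     f1 = r1.split(':')
--     f2 = r2.split(':')
--     assert len(f1) == len(f2)
--     k1, k2 = [], []
--     for a, b in zip(f1, f2):
--         try:
--             ia, ib = int(a), int(b)
--             k1.append(ia)
--             k2.append(ib)
--         except ValueError:
--             k1.append(a)
--             k2.append(b)
--     return k1 > k2
-- ===== Notes on version B (the rewrite author's own statement) =====
-- stated objective: idiomatic
-- what changed: Instead of A's index loop with early returns and a per-field try/except comparison cascade, B builds two parallel mixed-type key lists in one pass over zip(split1, split2) and returns a single built-in lexicographic list comparison k1 > k2.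
import Mathlib
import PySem

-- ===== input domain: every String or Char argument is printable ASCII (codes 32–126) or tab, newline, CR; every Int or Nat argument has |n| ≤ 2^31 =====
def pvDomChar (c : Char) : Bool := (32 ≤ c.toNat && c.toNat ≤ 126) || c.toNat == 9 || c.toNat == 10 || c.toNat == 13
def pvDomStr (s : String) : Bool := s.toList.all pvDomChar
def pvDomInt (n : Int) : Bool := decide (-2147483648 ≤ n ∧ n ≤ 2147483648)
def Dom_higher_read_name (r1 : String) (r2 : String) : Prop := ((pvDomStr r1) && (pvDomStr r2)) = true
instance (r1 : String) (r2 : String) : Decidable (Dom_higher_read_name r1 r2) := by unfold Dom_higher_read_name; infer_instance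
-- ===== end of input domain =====

-- B replaces A's index loop with early returns and a per-field try/except comparison cascade by
-- one pass over the zipped fields building two mixed-type key lists, compared once lexicographically
-- at the end (objective: idiomatic). Both raise (assert) when the split lengths differ; Pre_ excludes that.

-- ===== PORT A =====
-- the for-loop over range(len(r1)); per step: try int both (none = ValueError), compare, else string-compare
def aLoop : List String → List String → Bool
  | a :: xs, b :: ys =>
    match PySem.Int.ofStr? a, PySem.Int.ofStr? b with
    | some ia, some ib =>
      if ia < ib then false
      else if ib < ia then true
      else aLoop xs ys
    | _, _ =>
      if a < b then false
      else if b < a then true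
      else aLoop xs ys
  | _, _ => false  -- loop exhausted: "equity" → False

-- split? _ ":" is always some (sep ≠ ""); .getD [] only unwraps it
def higher_read_name (r1 : String) (r2 : String) : Bool :=
  aLoop (((PySem.Str.split? r1 ":").getD [])) (((PySem.Str.split? r2 ":").getD []))

-- ===== PORT B =====
-- a Python list element that is an int or a str
inductive PyKey
  | int : Int → PyKey
  | str : String → PyKey
deriving DecidableEq, Repr

-- x > y for keys; mixed-type case never arises (keys are built pairwise same-typed)
def keyGt : PyKey → PyKey → Bool
  | .int i, .int j => decide (j < i)
  | .str a, .str b => decide (b < a)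
  | _, _ => false

-- Python's built-in list comparison k1 > k2 (first unequal element decides, else longer wins)
def listGt : List PyKey → List PyKey → Bool
  | x :: xs, y :: ys => if x = y then listGt xs ys else keyGt x y
  | _ :: _, [] => true
  | _, _ => false

-- the one pass over zip(f1, f2): try int on both fields, else keep the raw strings
def buildKeys : List (String × String) → List PyKey × List PyKey
  | [] => ([], [])
  | (a, b) :: rest =>
    let tl := buildKeys rest
    match PySem.Int.ofStr? a, PySem.Int.ofStr? b with
    | some ia, some ib => (PyKey.int ia :: tl.1, PyKey.int ib :: tl.2)
    | _, _ => (PyKey.str a :: tl.1, PyKey.str b :: tl.2)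

def higher_read_name_alt (r1 : String) (r2 : String) : Bool :=
  let f1 := ((PySem.Str.split? r1 ":").getD [])
  let f2 := ((PySem.Str.split? r2 ":").getD [])
  let ks := buildKeys (f1.zip f2)
  listGt ks.1 ks.2

-- ===== PRECONDITION & SPEC =====
-- A (and B alike) raises AssertionError when the ':'-split field counts differ; exactly those inputs are excluded.
def Pre_higher_read_name (r1 : String) (r2 : String) : Prop :=
  (((PySem.Str.split? r1 ":").getD [])).length = (((PySem.Str.split? r2 ":").getD [])).length
instance (r1 : String) (r2 : String) : Decidable (Pre_higher_read_name r1 r2) := by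
  unfold Pre_higher_read_name; infer_instance
def pvWitness_higher_read_name : String × String := ("simulated:12:7:abc", "simulated:12:10:abc")

def Spec_higher_read_name (r1 : String) (r2 : String) (out : Bool) : Prop := out = higher_read_name_alt r1 r2
instance (r1 : String) (r2 : String) (out : Bool) : Decidable (Spec_higher_read_name r1 r2 out) := by unfold Spec_higher_read_name; infer_instance

-- ===== CLAIM (what is proved, stated in full; the proofs are below) =====
def Claim_equal_higher_read_name : Prop := ∀ (r1 : String) (r2 : String), Dom_higher_read_name r1 r2 → Pre_higher_read_name r1 r2 → Spec_higher_read_name r1 r2 (higher_read_name r1 r2)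

-- ===== LEMMAS AND PROOFS =====
-- A's early-return loop equals B's build-then-compare, for ANY two field lists
theorem aLoop_eq_listGt (xs ys : List String) :
    aLoop xs ys = listGt (buildKeys (xs.zip ys)).1 (buildKeys (xs.zip ys)).2 := by
  induction xs generalizing ys with
  | nil => cases ys <;> simp [aLoop, buildKeys, listGt]
  | cons a xs ih =>
    cases ys with
    | nil => simp [aLoop, buildKeys, listGt]
    | cons b ys =>
      cases h1 : PySem.Int.ofStr? a <;> cases h2 : PySem.Int.ofStr? b <;>
        simp only [aLoop, buildKeys, List.zip_cons_cons, h1, h2, listGt]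
      · -- none / none : string compare
        rcases lt_trichotomy a b with h | h | h
        · simp [keyGt, h, not_lt_of_gt h, ne_of_lt h]
        · simp [h, ih]
        · simp [keyGt, h, not_lt_of_gt h, (ne_of_gt h)]
      · -- none / some : string compare
        rcases lt_trichotomy a b with h | h | h
        · simp [keyGt, h, not_lt_of_gt h, ne_of_lt h]
        · simp [h, ih]
        · simp [keyGt, h, not_lt_of_gt h, (ne_of_gt h)]
      · -- some / none : string compare
        rcases lt_trichotomy a b with h | h | h
        · simp [keyGt, h, not_lt_of_gt h, ne_of_lt h]
        · simp [h, ih]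
        · simp [keyGt, h, not_lt_of_gt h, (ne_of_gt h)]
      · -- some / some : int compare
        rename_i ia ib
        rcases lt_trichotomy ia ib with h | h | h
        · simp [keyGt, h, not_lt_of_gt h, ne_of_lt h]
        · simp [h, ih]
        · simp [keyGt, h, not_lt_of_gt h, (ne_of_gt h)]

-- ===== VERDICT (by name: the statement is the Claim_ definition above) =====
theorem higher_read_name_spec : Claim_equal_higher_read_name := by
  intro r1 r2 _ _
  unfold Spec_higher_read_name higher_read_name higher_read_name_alt
  exact aLoop_eq_listGt _ _
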